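-- pv_equiv track=rewrite | github.com/damienmarsic/dmbiolib | build/lib/dmbiolib.py | shortest_probe
-- ===== SOURCE A (Python) =====
-- def shortest_probe(seqs,lim,host,t):
--     if lim<1:
--         lim=1
--     fail=''
--     q=-1
--     x=min([len(k) for k in seqs])
--     y=set([k[-x:] for k in seqs])
--     if len(y)!=len(seqs):
--         fail='\n  Duplicate '+t+' found! '+t[0].upper()+t[1:]+'s must all be different when trimmed to their maximal common size!'
--     if host and len([k for k in y if k in host+host[:x-1]]):
--         fail+='\n  '+t[0].upper()+t[1:]+' found in the host genome!'
--     if not fail: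
--         q=lim
--         while True:
--             y=set([k[-q:] for k in seqs])
--             if len(y)==len(seqs) and max([k.count(p) for k in seqs for p in y])==1 and not len([k for k in y if k in host+host[:q-1]]):
--                 break
--             q+=1
--     return q,fail
-- ===== SOURCE B (Python) =====
-- def shortest_probe(seqs, lim, host, t):
--     if lim < 1:
--         lim = 1
--     x = min(len(k) for k in seqs)
--     y = {k[-x:] for k in seqs}
--     msgs = []
--     if len(y) != len(seqs):
--         msgs.append('\n  Duplicate '+t+' found! '+t[0].upper()+t[1:]+'s must all be different when trimmed to their maximal common size!')
--     if host and any(k in host+host[:x-1] for k in y):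
--         msgs.append('\n  '+t[0].upper()+t[1:]+' found in the host genome!')
--     if msgs:
--         return -1, ''.join(msgs)
--
--     def ok(q):
--         z = {k[-q:] for k in seqs}
--         return (len(z) == len(seqs)
--                 and all(k.count(p) <= 1 for k in seqs for p in z)
--                 and all(p not in host + host[:q - 1] for p in z))
--
--     # ok is monotone in q, so binary-search the least q in [lim, hi]
--     lo = lim
--     hi = max(lim, max(len(k) for k in seqs), len(host) + 1)
--     while lo < hi:
--         mid = (lo + hi) // 2
--         if ok(mid):
--             hi = mid
--         else:
--             lo = mid + 1
--     return lo, ''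
-- ===== Notes on version B (the rewrite author's own statement) =====
-- stated objective: alternative
-- what changed: A's while-loop that increments the candidate probe length q one by one until the feasibility test passes is replaced by a binary search for the least feasible q over [lim, max(lim, max sequence length, len(host)+1)], exploiting that the test is monotone in q; the failure-message branch is restructured as a message list that is joined.
import Mathlib
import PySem

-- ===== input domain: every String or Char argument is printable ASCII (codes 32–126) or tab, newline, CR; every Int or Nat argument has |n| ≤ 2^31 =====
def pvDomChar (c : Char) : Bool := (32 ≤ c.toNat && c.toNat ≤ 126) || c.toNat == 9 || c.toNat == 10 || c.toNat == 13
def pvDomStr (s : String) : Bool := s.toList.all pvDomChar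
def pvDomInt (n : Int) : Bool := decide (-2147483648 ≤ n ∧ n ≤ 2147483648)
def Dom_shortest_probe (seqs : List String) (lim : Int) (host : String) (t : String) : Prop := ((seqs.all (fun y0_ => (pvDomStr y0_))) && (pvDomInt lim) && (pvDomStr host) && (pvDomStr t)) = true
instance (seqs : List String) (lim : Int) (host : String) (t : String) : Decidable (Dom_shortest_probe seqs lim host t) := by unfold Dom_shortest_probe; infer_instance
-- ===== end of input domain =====

-- B replaces A's linear scan over candidate probe lengths by a binary search on the same
-- feasibility predicate (valid because the predicate is monotone in the probe length);
-- return values agree on every input admitted by Pre_.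

-- ===== PORT A =====
-- set([k[-q:] for k in seqs])  (shared subexpression of both Pythons)
def pvSuffixes (seqs : List String) (q : Int) : PySem.Set (List Char) :=
  PySem.Set.ofList (seqs.map (fun k => PySem.List.slice k.toList (some (-q)) none))

-- host+host[:q-1]  (shared subexpression of both Pythons)
def pvWrap (host : String) (q : Int) : List Char :=
  host.toList ++ PySem.List.slice host.toList none (some (q - 1))

-- A's loop condition at candidate length q (the big 'if' in the while loop)
def pvCondA (seqs : List String) (host : String) (q : Int) : Bool :=
  let y := pvSuffixes seqs q
  (y.length == seqs.length)
  && (match PySem.List.max? (seqs.flatMap (fun k => y.map (fun p => PySem.Chars.count k.toList p))) (fun c => c) with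
      | some m => m == 1
      | none => false)   -- max([]) raises ValueError; unreachable: seqs ≠ [] whenever the loop runs
  && ((y.filter (fun p => PySem.Chars.isIn p (pvWrap host q))).length == 0)

-- 'while True: … q += 1' (fuel makes it total; Pre_ guarantees the break fires within fuel)
def pvLoopA (seqs : List String) (host : String) : Nat → Int → Int × String
  | 0, q => (q, "")
  | f + 1, q => if pvCondA seqs host q then (q, "") else pvLoopA seqs host f (q + 1)

def shortest_probe (seqs : List String) (lim : Int) (host : String) (t : String) : Int × String :=
  let lim' := if lim < 1 then 1 else lim
  match PySem.List.min? (seqs.map (fun k => (k.toList.length : Int))) (fun v => v) with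
  | none => (-1, "")   -- min([]) raises ValueError on seqs = [] (outside Pre_)
  | some x =>
    let y := pvSuffixes seqs x
    let headUp : List Char :=
      match PySem.List.pyGet? t.toList 0 with
      | none => []       -- t[0] raises IndexError on t = '' (such uses are outside Pre_)
      | some c => PySem.Chars.upper [c]
    let t1 := PySem.List.slice t.toList (some 1) none
    let fail1 : List Char :=
      if y.length = seqs.length then []
      else "\n  Duplicate ".toList ++ t.toList ++ " found! ".toList ++ headUp ++ t1
           ++ "s must all be different when trimmed to their maximal common size!".toList
    let fail2 : List Char :=
      if host.toList ≠ [] ∧ (y.filter (fun k => PySem.Chars.isIn k (pvWrap host x))).length ≠ 0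
      then "\n  ".toList ++ headUp ++ t1 ++ " found in the host genome!".toList
      else []
    let fail := fail1 ++ fail2
    if fail = [] then
      pvLoopA seqs host ((seqs.map (fun k => k.toList.length)).foldr max 0 + host.toList.length + 2) lim'
    else (-1, String.ofList fail)

-- ===== PORT B =====
-- B's feasibility predicate ok(q)
def pvOkB (seqs : List String) (host : String) (q : Int) : Bool :=
  let z := pvSuffixes seqs q
  (z.length == seqs.length)
  && seqs.all (fun k => z.all (fun p => PySem.Chars.count k.toList p ≤ 1))
  && z.all (fun p => !PySem.Chars.isIn p (pvWrap host q))

-- 'while lo < hi: mid = (lo+hi)//2; …' binary search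
def pvBsearch (seqs : List String) (host : String) (lo hi : Int) : Int :=
  if h : lo < hi then
    let mid := PySem.Int.floordiv (lo + hi) 2
    if pvOkB seqs host mid then pvBsearch seqs host lo mid
    else pvBsearch seqs host (mid + 1) hi
  else lo
termination_by (hi - lo).toNat
decreasing_by
  all_goals
    have h1 : lo ≤ PySem.Int.floordiv (lo + hi) 2 ∧ PySem.Int.floordiv (lo + hi) 2 ≤ hi :=
      PySem.Int.floordiv_two_mid_bounds (le_of_lt h)
    have h2 : PySem.Int.floordiv (lo + hi) 2 < hi := by
      rw [PySem.Int.floordiv_lt_iff_lt_mul (by omega)]; omega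
    omega

def shortest_probe_alt (seqs : List String) (lim : Int) (host : String) (t : String) : Int × String :=
  let lim' := if lim < 1 then 1 else lim
  match PySem.List.min? (seqs.map (fun k => (k.toList.length : Int))) (fun v => v) with
  | none => (-1, "")   -- min() of the empty generator raises (outside Pre_)
  | some x =>
    let y := pvSuffixes seqs x
    let headUp : List Char :=
      match PySem.List.pyGet? t.toList 0 with
      | none => []       -- t[0] raises IndexError on t = '' (such uses are outside Pre_)
      | some c => PySem.Chars.upper [c]
    let t1 := PySem.List.slice t.toList (some 1) none
    let msgs : List (List Char) :=
      (if y.length = seqs.length then []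
       else ["\n  Duplicate ".toList ++ t.toList ++ " found! ".toList ++ headUp ++ t1
             ++ "s must all be different when trimmed to their maximal common size!".toList])
      ++ (if host.toList ≠ [] ∧ y.any (fun k => PySem.Chars.isIn k (pvWrap host x)) = true
          then ["\n  ".toList ++ headUp ++ t1 ++ " found in the host genome!".toList]
          else [])
    if msgs = [] then
      let hi : Int :=
        match PySem.List.max? (seqs.map (fun k => (k.toList.length : Int))) (fun v => v) with
        | none => lim'   -- max() over the empty generator raises; unreachable: seqs ≠ [] here
        | some m => max lim' (max m ((host.toList.length : Int) + 1))
      (pvBsearch seqs host lim' hi, "")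
    else (-1, String.ofList (PySem.Chars.join [] msgs))

-- ===== PRECONDITION & SPEC =====
-- the input triggers A's failure-message branch (duplicate trimmed sequence, or one found in the wrapped host)
def pvFailCond (seqs : List String) (host : String) : Bool :=
  match PySem.List.min? (seqs.map (fun k => (k.toList.length : Int))) (fun v => v) with
  | none => false
  | some x =>
    ((pvSuffixes seqs x).length != seqs.length)
    || (!host.toList.isEmpty && (pvSuffixes seqs x).any (fun k => PySem.Chars.isIn k (pvWrap host x)))

-- closed-form condition under which A's search loop terminates: the sequences are pairwise
-- distinct, none occurs twice in any of them, and none occurs in the circularly doubled host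
def pvStab (seqs : List String) (host : String) : Bool :=
  decide ((seqs.map String.toList).Nodup)
  && seqs.all (fun k => seqs.all (fun p => PySem.Chars.count k.toList p.toList ≤ 1))
  && seqs.all (fun p => !PySem.Chars.isIn p.toList (host.toList ++ host.toList))

-- Pre_ excludes exactly: seqs = [] (min([]) raises ValueError), t = '' when a failure message is
-- built (t[0] raises IndexError), and inputs whose search loop never terminates (A returns nothing).
def Pre_shortest_probe (seqs : List String) (lim : Int) (host : String) (t : String) : Prop :=
  seqs ≠ [] ∧ (pvFailCond seqs host = true → t ≠ "") ∧
    (pvFailCond seqs host = false → pvStab seqs host = true)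
instance (seqs : List String) (lim : Int) (host : String) (t : String) : Decidable (Pre_shortest_probe seqs lim host t) := by unfold Pre_shortest_probe; infer_instance

def pvWitness_shortest_probe : List String × Int × String × String := (["AC", "GT"], 1, "TT", "probe")

def Spec_shortest_probe (seqs : List String) (lim : Int) (host : String) (t : String) (out : Int × String) : Prop := out = shortest_probe_alt seqs lim host t
instance (seqs : List String) (lim : Int) (host : String) (t : String) (out : Int × String) : Decidable (Spec_shortest_probe seqs lim host t out) := by unfold Spec_shortest_probe; infer_instance

-- ===== CLAIM (what is proved, stated in full; the proofs are below) =====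
def Claim_equal_shortest_probe : Prop := ∀ (seqs : List String) (lim : Int) (host : String) (t : String), Dom_shortest_probe seqs lim host t → Pre_shortest_probe seqs lim host t → Spec_shortest_probe seqs lim host t (shortest_probe seqs lim host t)

-- ===== LEMMAS AND PROOFS =====

-- set(l) has as many elements as l iff l has no duplicates
theorem pvLenOfList {α : Type} [BEq α] [LawfulBEq α] (l : List α) :
    (PySem.Set.ofList l).length = l.length ↔ l.Nodup := by
  induction l using List.reverseRecOn with
  | nil => simp [PySem.Set.ofList_nil]
  | append_singleton l x ih =>
    rw [PySem.Set.ofList_append_singleton, PySem.Set.add_eq_ite]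
    by_cases hx : x ∈ PySem.Set.ofList l
    · rw [if_pos hx]
      have hxl : x ∈ l := by
        have := PySem.Set.mem_ofList (y := x) (xs := l)
        tauto
      have hle := PySem.Set.length_ofList_le (xs := l)
      simp only [List.length_append, List.length_cons, List.length_nil, List.nodup_append]
      constructor
      · intro hlen; omega
      · intro hnd
        have hdisj := hnd.2.2
        exact absurd hxl (fun hmem => hdisj x hmem x (by simp) rfl)
    · rw [if_neg hx]
      have hxl : x ∉ l := by
        have := PySem.Set.mem_ofList (y := x) (xs := l)
        tauto
      simp only [List.length_append, List.length_cons, List.length_nil, List.nodup_append]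
      constructor
      · intro hlen
        refine ⟨(ih.mp (by omega)), by simp, ?_⟩
        intro a ha b hb
        simp at hb
        subst hb
        exact fun he => hxl (he ▸ ha)
      · intro hnd
        have := ih.mpr hnd.1
        omega

-- greedy non-overlapping occurrence counter (the semantics of str.count for a nonempty needle)
def pvGcount (sub : List Char) : List Char → Nat
  | [] => 0
  | c :: tl =>
    if sub.isPrefixOf (c :: tl) then pvGcount sub (tl.drop (sub.length - 1)) + 1
    else pvGcount sub tl
termination_by l => l.length
decreasing_by
  · simpa using Nat.lt_succ_of_le (List.length_drop_le _ _)
  · simp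

theorem pvInfix_iff_drop (p l : List Char) : p <:+: l ↔ ∃ j, p <+: l.drop j := by
  constructor
  · intro h
    exact (PySem.Chars.exists_prefix_drop_iff_isIn p l).mpr ((PySem.Chars.isIn_iff_infix p l).mpr h)
  · intro h
    exact (PySem.Chars.isIn_iff_infix p l).mp ((PySem.Chars.exists_prefix_drop_iff_isIn p l).mp h)

theorem pvGo_eq (sub : List Char) (h : sub ≠ []) :
    ∀ (f : Nat) (l : List Char) (acc : Nat), l.length ≤ f →
      PySem.Chars.count.go sub f l acc = acc + pvGcount sub l := by
  intro f
  induction f with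
  | zero =>
    intro l acc hl
    have hnil : l = [] := by
      cases l with
      | nil => rfl
      | cons a b => simp at hl
    subst hnil
    simp [PySem.Chars.count.go, pvGcount]
  | succ n ih =>
    intro l acc hl
    cases l with
    | nil => simp [PySem.Chars.count.go, pvGcount]
    | cons c tl =>
      rw [PySem.Chars.count.go, pvGcount]
      have hdrop : List.drop sub.length (c :: tl) = tl.drop (sub.length - 1) := by
        cases sub with
        | nil => exact absurd rfl h
        | cons a b => simp [List.drop_succ_cons]
      by_cases hp : sub.isPrefixOf (c :: tl) = true
      · rw [if_pos hp, if_pos hp, hdrop,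
          ih _ (acc + 1) (by simp only [List.length_drop]; simp at hl; omega)]
        omega
      · rw [if_neg hp, if_neg hp, ih _ acc (by simp at hl; omega)]

theorem pvCount_eq (s sub : List Char) (h : sub ≠ []) :
    PySem.Chars.count s sub = pvGcount sub s := by
  rw [PySem.Chars.count, if_neg (by simpa using h), pvGo_eq sub h s.length s 0 le_rfl]
  omega

theorem pvGcount_pos_iff (l sub : List Char) (h : sub ≠ []) :
    1 ≤ pvGcount sub l ↔ sub <:+: l := by
  induction l using pvGcount.induct sub with
  | case1 => simp [pvGcount, List.infix_nil, h]
  | case2 c tl hp ih =>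
    rw [pvGcount, if_pos hp]
    simp only [Nat.le_add_left, true_iff]
    exact ((List.isPrefixOf_iff_prefix).mp hp).isInfix
  | case3 c tl hp ih =>
    rw [pvGcount, if_neg hp]
    rw [ih, List.infix_cons_iff]
    constructor
    · exact fun hh => Or.inr hh
    · rintro (hh | hh)
      · exact absurd ((List.isPrefixOf_iff_prefix).mpr hh) hp
      · exact hh

theorem pvInfixOfPrefixDrop {p l : List Char} {j : Nat} (h : p <+: l.drop j) : p <:+: l :=
  (pvInfix_iff_drop p l).mpr ⟨j, h⟩

theorem pvGcount_two_exists (l sub : List Char) (h : sub ≠ []) (h2 : 2 ≤ pvGcount sub l) :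
    ∃ i, sub <+: l.drop i ∧ sub <:+: l.drop (i + sub.length) := by
  induction l using pvGcount.induct sub with
  | case1 => simp [pvGcount] at h2
  | case2 c tl hp ih =>
    rw [pvGcount, if_pos hp] at h2
    have h1 : 1 ≤ pvGcount sub (tl.drop (sub.length - 1)) := by omega
    have hdrop : List.drop sub.length (c :: tl) = tl.drop (sub.length - 1) := by
      cases sub with
      | nil => exact absurd rfl h
      | cons a b => simp [List.drop_succ_cons]
    refine ⟨0, by simpa using (List.isPrefixOf_iff_prefix).mp hp, ?_⟩
    rw [Nat.zero_add, hdrop]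
    exact (pvGcount_pos_iff _ sub h).mp h1
  | case3 c tl hp ih =>
    rw [pvGcount, if_neg hp] at h2
    obtain ⟨i, hi1, hi2⟩ := ih h2
    exact ⟨i + 1, by simpa [List.drop_succ_cons] using hi1,
      by rw [show i + 1 + sub.length = (i + sub.length) + 1 by omega, List.drop_succ_cons]; exact hi2⟩

theorem pvGcount_two_of (l sub : List Char) (h : sub ≠ []) :
    ∀ (i : Nat), sub <+: l.drop i → sub <:+: l.drop (i + sub.length) → 2 ≤ pvGcount sub l := by
  induction l using pvGcount.induct sub with
  | case1 =>
    intro i h1 h2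
    rw [List.drop_nil] at h1
    exact absurd (List.prefix_nil.mp h1) h
  | case2 c tl hp ih =>
    intro i h1 h2
    rw [pvGcount, if_pos hp]
    have hdrop : List.drop sub.length (c :: tl) = tl.drop (sub.length - 1) := by
      cases sub with
      | nil => exact absurd rfl h
      | cons a b => simp [List.drop_succ_cons]
    have hinf : sub <:+: List.drop sub.length (c :: tl) := by
      have hsfx : List.drop (i + sub.length) (c :: tl) <:+ List.drop sub.length (c :: tl) := by
        rw [show i + sub.length = sub.length + i by omega, ← List.drop_drop]
        exact List.drop_suffix _ _
      exact h2.trans hsfx.isInfix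
    rw [hdrop] at hinf
    have := (pvGcount_pos_iff _ sub h).mpr hinf
    omega
  | case3 c tl hp ih =>
    intro i h1 h2
    rw [pvGcount, if_neg hp]
    cases i with
    | zero =>
      rw [List.drop_zero] at h1
      exact absurd ((List.isPrefixOf_iff_prefix).mpr h1) hp
    | succ j =>
      rw [List.drop_succ_cons] at h1
      rw [show j + 1 + sub.length = (j + sub.length) + 1 by omega, List.drop_succ_cons] at h2
      exact ih j h1 h2

theorem pvCount_pos_of_infix (s sub : List Char) (h : sub <:+: s) :
    1 ≤ PySem.Chars.count s sub := by
  by_cases hs : sub = []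
  · subst hs
    rw [PySem.Chars.count]
    simp
  · rw [pvCount_eq s sub hs]
    exact (pvGcount_pos_iff s sub hs).mpr h

theorem pvCount_mono (s sub sub' : List Char) (hsuf : sub <:+ sub')
    (h : PySem.Chars.count s sub ≤ 1) : PySem.Chars.count s sub' ≤ 1 := by
  by_cases hs' : sub' = []
  · subst hs'
    rw [List.suffix_nil.mp hsuf] at h
    exact h
  by_cases hs : sub = []
  · -- sub = '': count s '' = len(s)+1 ≤ 1 forces s = [], and gcount of nonempty sub' in [] is 0
    subst hs
    rw [PySem.Chars.count, if_pos (by simp)] at h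
    have hsnil : s = [] := by
      cases s with
      | nil => rfl
      | cons a b => simp at h
    subst hsnil
    rw [pvCount_eq [] sub' hs']
    simp [pvGcount]
  · rw [pvCount_eq s sub hs] at h
    rw [pvCount_eq s sub' hs']
    by_contra hc
    have h2 : 2 ≤ pvGcount sub' s := by omega
    obtain ⟨i, hi1, hi2⟩ := pvGcount_two_exists s sub' hs' h2
    obtain ⟨pre, hpre⟩ := hsuf
    have hd : sub = sub'.drop pre.length := by rw [← hpre]; simp
    have hlen : pre.length + sub.length = sub'.length := by rw [← hpre]; simp
    -- shift the two disjoint occurrences of sub' to occurrences of its suffix sub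
    have occ1 : sub <+: s.drop (i + pre.length) := by
      obtain ⟨r, hr⟩ := hi1
      have : s.drop (i + pre.length) = sub'.drop pre.length ++ r := by
        rw [← List.drop_drop, ← hr, List.drop_append_of_le_length (by omega)]
      rw [this, ← hd]
      exact ⟨r, rfl⟩
    have occ2 : sub <:+: s.drop ((i + pre.length) + sub.length) := by
      have he : (i + pre.length) + sub.length = i + sub'.length := by omega
      rw [he]
      exact (hd ▸ (List.drop_suffix pre.length sub').isInfix).trans hi2
    have := pvGcount_two_of s sub hs (i + pre.length) occ1 occ2
    omega

-- k[-q:] for q ≥ 1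
theorem pvSlice_neg (k : List Char) (q : Int) (h : 1 ≤ q) :
    PySem.List.slice k (some (-q)) none = k.drop (k.length - q.toNat) := by
  have hq' : -q = -((q.toNat : Nat) : Int) := by omega
  rw [hq', PySem.List.slice_from_neg_natCast _ _ (by omega)]

-- the length-n suffix of the length-(n+1) suffix is the length-n suffix
theorem pvSuf_succ (k : List Char) (n : Nat) :
    k.drop (k.length - n) =
      (k.drop (k.length - (n + 1))).drop ((k.drop (k.length - (n + 1))).length - n) := by
  rw [List.drop_drop]
  congr 1
  simp only [List.length_drop]
  omega

theorem pvWrap_eq (host : String) (q : Int) (h : 1 ≤ q) :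
    pvWrap host q = host.toList ++ host.toList.take (q - 1).toNat := by
  unfold pvWrap
  rw [PySem.List.slice_to]
  omega

-- circular-host step: if the (n+1)-suffix occurs in host+host[:n], the n-suffix occurs in host+host[:n-1]
theorem pvWrapStep (h p' : List Char) (n : Nat) (hn : 1 ≤ n)
    (hp : p' <:+: h ++ h.take n) :
    p'.drop (p'.length - n) <:+: h ++ h.take (n - 1) := by
  by_cases hnil : p' = []
  · subst hnil; simp
  obtain ⟨j, hj⟩ := (pvInfix_iff_drop _ _).mp hp
  set s := h ++ h.take n with hs
  have hjlen : j + p'.length ≤ s.length := by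
    have hl := hj.length_le
    simp only [List.length_drop] at hl
    by_cases hjs : j ≤ s.length
    · omega
    · exfalso
      have hde : s.drop j = [] := List.drop_eq_nil_iff.mpr (by omega)
      rw [hde] at hj
      exact hnil (List.prefix_nil.mp hj)
  have hslen : s.length = h.length + min n h.length := by simp [hs]
  set d := p'.length - n with hd
  set p := p'.drop d with hpdef
  have hplen : p.length = min n p'.length := by
    simp only [hpdef, List.length_drop]
    omega
  have hdp : d + p.length = p'.length := by omega
  have hshift : p <+: s.drop (j + d) := by
    obtain ⟨r, hr⟩ := hj
    refine ⟨r, ?_⟩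
    rw [← List.drop_drop, ← hr, hpdef, List.drop_append_of_le_length (by omega)]
  by_cases hcase : j + p'.length ≤ h.length + min (n - 1) h.length
  · -- the occurrence ends inside host+host[:n-1]
    have htake : h ++ h.take (n - 1) = s.take (h.length + min (n - 1) h.length) := by
      rw [hs, List.take_append, List.take_of_length_le (show h.length ≤ h.length + min (n - 1) h.length by omega)]
      congr 1
      rw [show h.length + min (n - 1) h.length - h.length = min (n - 1) h.length by omega,
        List.take_take]
      rcases Nat.le_total h.length (n - 1) with hcc | hcc
      · rw [show min (min (n - 1) h.length) n = h.length by omega,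
          List.take_of_length_le le_rfl, List.take_of_length_le hcc]
      · rw [show min (min (n - 1) h.length) n = n - 1 by omega]
    apply pvInfixOfPrefixDrop (j := j + d)
    rw [htake, List.drop_take]
    rw [List.prefix_take_iff]
    exact ⟨hshift, by omega⟩
  · -- the occurrence ends at the very last character: p lies wholly inside h.take n
    have hnh : n ≤ h.length := by omega
    have hge : h.length ≤ j + d := by omega
    have hsplit : s.drop (j + d) = (h.take n).drop (j + d - h.length) := by
      rw [hs, List.drop_append, List.drop_eq_nil_iff.mpr (by omega), List.nil_append]
    have hpin : p <:+: h.take n := pvInfixOfPrefixDrop (hsplit ▸ hshift)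
    have hph : p <:+: h := hpin.trans (List.take_prefix n h).isInfix
    exact hph.trans (List.prefix_append h (h.take (n - 1))).isInfix

theorem pvNodupLen (seqs : List String) (f : String → List Char) :
    ((PySem.Set.ofList (seqs.map f)).length = seqs.length ↔ (seqs.map f).Nodup) := by
  conv_lhs => rw [show seqs.length = (seqs.map f).length from (List.length_map f).symm]
  exact pvLenOfList _

theorem pvOkB_mono (seqs : List String) (host : String) (q : Int) (hq : 1 ≤ q)
    (h : pvOkB seqs host q = true) : pvOkB seqs host (q + 1) = true := by
  set n := q.toNat with hn
  have hn1 : 1 ≤ n := by omega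
  have hq1n : (q + 1).toNat = n + 1 := by omega
  have hsl : ∀ k : List Char, PySem.List.slice k (some (-q)) none = k.drop (k.length - n) :=
    fun k => pvSlice_neg k q hq
  have hsl1 : ∀ k : List Char,
      PySem.List.slice k (some (-(q + 1))) none = k.drop (k.length - (n + 1)) := by
    intro k
    rw [pvSlice_neg k (q + 1) (by omega), hq1n]
  have hw1 : pvWrap host (q + 1) = host.toList ++ host.toList.take n := by
    rw [pvWrap_eq host (q + 1) (by omega), show q + 1 - 1 = q by ring, ← hn]
  have hw : pvWrap host q = host.toList ++ host.toList.take (n - 1) := by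
    rw [pvWrap_eq host q hq, show (q - 1).toNat = n - 1 by omega]
  simp only [pvOkB, pvSuffixes, Bool.and_eq_true, beq_iff_eq, List.all_eq_true] at h ⊢
  obtain ⟨⟨hlen, hcnt⟩, hhost⟩ := h
  simp only [hsl, hw] at hlen hcnt hhost
  simp only [hsl1, hw1]
  have hmapeq : seqs.map (fun k => k.toList.drop (k.toList.length - n))
      = (seqs.map (fun k => k.toList.drop (k.toList.length - (n + 1)))).map
          (fun p => p.drop (p.length - n)) := by
    rw [List.map_map]
    exact List.map_congr_left (fun k _ => pvSuf_succ k.toList n)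
  refine ⟨⟨?_, ?_⟩, ?_⟩
  · rw [pvNodupLen] at hlen ⊢
    rw [hmapeq] at hlen
    exact hlen.of_map
  · intro k hk p' hp'
    rw [PySem.Set.mem_ofList, List.mem_map] at hp'
    obtain ⟨j, hj, rfl⟩ := hp'
    have hpmem : j.toList.drop (j.toList.length - n)
        ∈ PySem.Set.ofList (seqs.map (fun k => k.toList.drop (k.toList.length - n))) := by
      rw [PySem.Set.mem_ofList, List.mem_map]
      exact ⟨j, hj, rfl⟩
    have hc := hcnt k hk _ hpmem
    simp only [decide_eq_true_eq] at hc ⊢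
    rw [pvSuf_succ j.toList n] at hc
    exact pvCount_mono k.toList _ _ (List.drop_suffix _ _) hc
  · intro p' hp'
    rw [PySem.Set.mem_ofList, List.mem_map] at hp'
    obtain ⟨j, hj, rfl⟩ := hp'
    rw [Bool.not_eq_eq_eq_not, Bool.not_true, PySem.Chars.isIn_eq_false_iff]
    intro hinf
    have hstep := pvWrapStep host.toList (j.toList.drop (j.toList.length - (n + 1))) n hn1 hinf
    have hpmem : j.toList.drop (j.toList.length - n)
        ∈ PySem.Set.ofList (seqs.map (fun k => k.toList.drop (k.toList.length - n))) := by
      rw [PySem.Set.mem_ofList, List.mem_map]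
      exact ⟨j, hj, rfl⟩
    have hh := hhost _ hpmem
    rw [Bool.not_eq_eq_eq_not, Bool.not_true, PySem.Chars.isIn_eq_false_iff] at hh
    rw [← pvSuf_succ j.toList n] at hstep
    exact hh hstep


theorem pvOkB_chain (seqs : List String) (host : String) (a b : Int) (ha : 1 ≤ a) (hab : a ≤ b)
    (h : pvOkB seqs host a = true) : pvOkB seqs host b = true := by
  have hd : b = a + ((b - a).toNat : Int) := by omega
  rw [hd]
  clear hd hab
  induction (b - a).toNat with
  | zero => simpa using h
  | succ n ih =>
    have : a + ((n : Int) + 1) = (a + n) + 1 := by ring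
    push_cast
    rw [this]
    exact pvOkB_mono seqs host (a + n) (by omega) (by exact_mod_cast ih)

theorem pvCondA_eq (seqs : List String) (host : String) (q : Int) (hne : seqs ≠ [])
    (hq : 1 ≤ q) : pvCondA seqs host q = pvOkB seqs host q := by
  obtain ⟨s0, rest, rfl⟩ : ∃ s0 rest, seqs = s0 :: rest := by
    cases seqs with
    | nil => exact absurd rfl hne
    | cons a b => exact ⟨a, b, rfl⟩
  simp only [pvCondA, pvOkB]
  have h3 : ∀ (z : List (List Char)) (f : List Char → Bool),
      ((z.filter f).length == 0) = z.all (fun p => !f p) := by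
    intro z f
    rw [Bool.eq_iff_iff]
    simp [List.length_eq_zero_iff, List.filter_eq_nil_iff]
  rw [h3]
  have h2 : (match PySem.List.max? ((s0 :: rest).flatMap
        (fun k => (pvSuffixes (s0 :: rest) q).map
          (fun p => PySem.Chars.count k.toList p))) (fun c => c) with
      | some m => m == 1
      | none => false)
      = (s0 :: rest).all (fun k => (pvSuffixes (s0 :: rest) q).all
          (fun p => PySem.Chars.count k.toList p ≤ 1)) := by
    rw [Bool.eq_iff_iff]
    constructor
    · intro hm
      cases hmx : PySem.List.max? ((s0 :: rest).flatMap
          (fun k => (pvSuffixes (s0 :: rest) q).map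
            (fun p => PySem.Chars.count k.toList p))) (fun c => c) with
      | none => rw [hmx] at hm; exact absurd hm (by simp)
      | some m =>
        rw [hmx] at hm
        have hm1 : m = 1 := by simpa using hm
        simp only [List.all_eq_true, decide_eq_true_eq]
        intro k hk p hp
        have hmem : PySem.Chars.count k.toList p ∈ (s0 :: rest).flatMap
            (fun k => (pvSuffixes (s0 :: rest) q).map
              (fun p => PySem.Chars.count k.toList p)) := by
          rw [List.mem_flatMap]
          exact ⟨k, hk, List.mem_map.mpr ⟨p, hp, rfl⟩⟩
        have := PySem.List.max?_isMax hmx _ hmem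
        omega
    · intro hall
      have hz0 : PySem.List.slice s0.toList (some (-q)) none ∈ pvSuffixes (s0 :: rest) q := by
        rw [pvSuffixes, PySem.Set.mem_ofList, List.mem_map]
        exact ⟨s0, by simp, rfl⟩
      have hc0 : PySem.Chars.count s0.toList (PySem.List.slice s0.toList (some (-q)) none)
          ∈ (s0 :: rest).flatMap (fun k => (pvSuffixes (s0 :: rest) q).map
              (fun p => PySem.Chars.count k.toList p)) := by
        rw [List.mem_flatMap]
        exact ⟨s0, by simp, List.mem_map.mpr ⟨_, hz0, rfl⟩⟩
      cases hmx : PySem.List.max? ((s0 :: rest).flatMap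
          (fun k => (pvSuffixes (s0 :: rest) q).map
            (fun p => PySem.Chars.count k.toList p))) (fun c => c) with
      | none =>
        rw [PySem.List.max?_eq_none_iff] at hmx
        rw [hmx] at hc0
        simp at hc0
      | some m =>
        have hmle : m ≤ 1 := by
          have hmmem := PySem.List.max?_mem hmx
          rw [List.mem_flatMap] at hmmem
          obtain ⟨k, hk, hmk⟩ := hmmem
          rw [List.mem_map] at hmk
          obtain ⟨p, hp, rfl⟩ := hmk
          simp only [List.all_eq_true, decide_eq_true_eq] at hall
          exact hall k hk p hp
        have hmge : 1 ≤ m := by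
          have h1 : 1 ≤ PySem.Chars.count s0.toList
              (PySem.List.slice s0.toList (some (-q)) none) := by
            apply pvCount_pos_of_infix
            rw [pvSlice_neg _ _ hq]
            exact (List.drop_suffix _ _).isInfix
          have := PySem.List.max?_isMax hmx _ hc0
          omega
        simp [show m = 1 by omega]
  rw [h2]


theorem pvOkB_stab (seqs : List String) (host : String) (q : Int) (hq : 1 ≤ q)
    (hlen : ∀ k ∈ seqs, (k.toList.length : Int) ≤ q)
    (hh : (host.toList.length : Int) + 1 ≤ q) :
    pvOkB seqs host q = pvStab seqs host := by
  have hsl : ∀ k ∈ seqs, PySem.List.slice k.toList (some (-q)) none = k.toList := by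
    intro k hk
    rw [pvSlice_neg _ _ hq]
    have := hlen k hk
    rw [show k.toList.length - q.toNat = 0 by omega, List.drop_zero]
  have hmapeq : seqs.map (fun k => PySem.List.slice k.toList (some (-q)) none)
      = seqs.map String.toList := List.map_congr_left (fun k hk => hsl k hk)
  have hwrap : pvWrap host q = host.toList ++ host.toList := by
    rw [pvWrap_eq host q hq, List.take_of_length_le (by omega)]
  simp only [pvOkB, pvSuffixes, pvStab, hmapeq, hwrap]
  have c1 : ((PySem.Set.ofList (seqs.map String.toList)).length == seqs.length)
      = decide ((seqs.map String.toList).Nodup) := by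
    rw [Bool.eq_iff_iff]
    simp only [beq_iff_eq, decide_eq_true_eq]
    exact pvNodupLen seqs String.toList
  have c2 : (seqs.all fun k => (PySem.Set.ofList (seqs.map String.toList)).all
        (fun p => PySem.Chars.count k.toList p ≤ 1))
      = (seqs.all fun k => seqs.all (fun p => PySem.Chars.count k.toList p.toList ≤ 1)) := by
    rw [Bool.eq_iff_iff]
    simp only [List.all_eq_true, decide_eq_true_eq]
    constructor
    · intro hall k hk p hp
      exact hall k hk p.toList (by
        rw [PySem.Set.mem_ofList, List.mem_map]
        exact ⟨p, hp, rfl⟩)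
    · intro hall k hk p hp
      rw [PySem.Set.mem_ofList, List.mem_map] at hp
      obtain ⟨j, hj, rfl⟩ := hp
      exact hall k hk j hj
  have c3 : ((PySem.Set.ofList (seqs.map String.toList)).all
        (fun p => !PySem.Chars.isIn p (host.toList ++ host.toList)))
      = (seqs.all fun p => !PySem.Chars.isIn p.toList (host.toList ++ host.toList)) := by
    rw [Bool.eq_iff_iff]
    simp only [List.all_eq_true]
    constructor
    · intro hall p hp
      exact hall p.toList (by
        rw [PySem.Set.mem_ofList, List.mem_map]
        exact ⟨p, hp, rfl⟩)
    · intro hall p hp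
      rw [PySem.Set.mem_ofList, List.mem_map] at hp
      obtain ⟨j, hj, rfl⟩ := hp
      exact hall j hj
  rw [c1, c2, c3]

theorem pvLoopA_spec (seqs : List String) (host : String) (L : Int)
    (hL : pvCondA seqs host L = true) :
    ∀ (f : Nat) (q : Int), q ≤ L → L < q + f →
      (∀ r, q ≤ r → r < L → pvCondA seqs host r = false) →
      pvLoopA seqs host f q = (L, "") := by
  intro f
  induction f with
  | zero => intro q h1 h2 _; omega
  | succ n ih =>
    intro q h1 h2 hmin
    rw [pvLoopA]
    by_cases hq : pvCondA seqs host q = true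
    · have : q = L := by
        by_contra hne
        have := hmin q le_rfl (by omega)
        rw [this] at hq; exact absurd hq (by simp)
      rw [if_pos hq, this]
    · rw [if_neg hq]
      have hqL : q ≠ L := fun he => hq (he ▸ hL)
      exact ih (q + 1) (by omega) (by omega) (fun r hr1 hr2 => hmin r (by omega) hr2)

theorem pvBsearchAux (seqs : List String) (host : String) (L : Int) :
    ∀ (m : Nat) (lo hi : Int), (hi - lo).toNat ≤ m → 1 ≤ lo → lo ≤ L → L ≤ hi →
      pvOkB seqs host L = true →
      (∀ r, lo ≤ r → r < L → pvOkB seqs host r = false) →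
      pvBsearch seqs host lo hi = L := by
  intro m
  induction m with
  | zero =>
    intro lo hi hm h1 h2 h3 _ _
    rw [pvBsearch, dif_neg (by omega)]
    omega
  | succ n ih =>
    intro lo hi hm h1 h2 h3 hok hmin
    rw [pvBsearch]
    by_cases hlt : lo < hi
    · rw [dif_pos hlt]
      have hb1 : lo ≤ PySem.Int.floordiv (lo + hi) 2 :=
        (PySem.Int.floordiv_two_mid_bounds (le_of_lt hlt)).1
      have hb2 : PySem.Int.floordiv (lo + hi) 2 < hi := by
        rw [PySem.Int.floordiv_lt_iff_lt_mul (by omega)]; omega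
      by_cases hok_mid : pvOkB seqs host (PySem.Int.floordiv (lo + hi) 2) = true
      · rw [if_pos hok_mid]
        have hLmid : L ≤ PySem.Int.floordiv (lo + hi) 2 := by
          by_contra hc
          rw [not_le] at hc
          have := hmin _ hb1 hc
          rw [this] at hok_mid
          exact absurd hok_mid (by simp)
        exact ih lo _ (by omega) h1 h2 hLmid hok hmin
      · rw [if_neg hok_mid]
        have hmidL : PySem.Int.floordiv (lo + hi) 2 < L := by
          by_contra hc
          rw [not_lt] at hc
          exact hok_mid (pvOkB_chain seqs host L _ (by omega) hc hok)
        exact ih _ hi (by omega) (by omega) (by omega) h3 hok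
          (fun r hr1 hr2 => hmin r (by omega) hr2)
    · rw [dif_neg hlt]
      omega

theorem pvBsearch_spec (seqs : List String) (host : String) (L : Int) :
    ∀ (lo hi : Int), 1 ≤ lo → lo ≤ L → L ≤ hi → pvOkB seqs host L = true →
      (∀ r, lo ≤ r → r < L → pvOkB seqs host r = false) →
      pvBsearch seqs host lo hi = L := by
  intro lo hi
  exact pvBsearchAux seqs host L (hi - lo).toNat lo hi le_rfl

theorem pvFilterLen {α : Type} (l : List α) (p : α → Bool) :
    ((l.filter p).length ≠ 0) ↔ l.any p = true := by
  simp [List.length_eq_zero_iff, List.filter_eq_nil_iff]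

theorem pvLeFoldrMax (l : List Nat) : ∀ a ∈ l, a ≤ l.foldr max 0 := by
  induction l with
  | nil => simp
  | cons b tl ih =>
    intro a ha
    rcases List.mem_cons.mp ha with h | h
    · simp [h]
    · have := ih a h
      simp only [List.foldr_cons]
      omega

-- ===== VERDICT (by name: the statement is the Claim_ definition above) =====
theorem shortest_probe_spec : Claim_equal_shortest_probe := by
  unfold Claim_equal_shortest_probe
  intro seqs lim host t _hDom hPre
  obtain ⟨hne, hfailt, hstab⟩ := hPre
  unfold Spec_shortest_probe
  obtain ⟨x, hx⟩ : ∃ x,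
      PySem.List.min? (seqs.map (fun k => (k.toList.length : Int))) (fun v => v) = some x :=
    Option.ne_none_iff_exists'.mp (fun hn =>
      hne (by simpa using (PySem.List.min?_eq_none_iff _ _).mp hn))
  by_cases hdup : (pvSuffixes seqs x).length = seqs.length
  · by_cases hH : host.toList ≠ [] ∧
        (pvSuffixes seqs x).any (fun k => PySem.Chars.isIn k (pvWrap host x)) = true
    · simp only [shortest_probe, shortest_probe_alt, hx, pvFilterLen]
      first
        | (rw [if_pos hdup, if_pos hdup])
        | (rw [if_neg hdup, if_neg hdup])
      first
        | (rw [if_pos hH, if_pos hH])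
        | (rw [if_neg hH, if_neg hH])
      rw [if_neg (by simp), if_neg (by simp)]
      simp [PySem.Chars.join, List.intercalate]
    · -- no failure: A runs the linear scan, B the binary search; both return (L, "")
      have hfc : pvFailCond seqs host = false := by
        unfold pvFailCond
        rw [hx]
        simp only [bne_eq_false_iff_eq, Bool.or_eq_false_iff, Bool.and_eq_false_iff]
        constructor
        · simp [hdup]
        · by_cases hh : host.toList = []
          · left; simp [hh]
          · right
            rcases Bool.eq_false_or_eq_true ((pvSuffixes seqs x).any
              (fun k => PySem.Chars.isIn k (pvWrap host x))) with h | h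
            · exact absurd ⟨hh, h⟩ hH
            · exact h
      have hsb := hstab hfc
      simp only [shortest_probe, shortest_probe_alt, hx, pvFilterLen]
      rw [if_pos hdup, if_pos hdup, if_neg hH, if_neg hH]
      simp only [List.append_nil]
      -- both sides now are the loop vs the binary search
      set lim' : Int := if lim < 1 then 1 else lim with hlim'
      have hlim1 : 1 ≤ lim' := by rw [hlim']; split <;> omega
      obtain ⟨M, hM⟩ : ∃ M,
          PySem.List.max? (seqs.map (fun k => (k.toList.length : Int))) (fun v => v) = some M :=
        Option.ne_none_iff_exists'.mp (fun hn =>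
          hne (by simpa using (PySem.List.max?_eq_none_iff _ _).mp hn))
      rw [hM]
      simp only
      set hi : Int := max lim' (max M ((host.toList.length : Int) + 1)) with hhi
      have hMmax : ∀ k ∈ seqs, (k.toList.length : Int) ≤ M := by
        intro k hk
        have := PySem.List.max?_isMax hM ((k.toList.length : Int)) (by
          simp only [List.mem_map]
          exact ⟨k, hk, rfl⟩)
        simpa using this
      have hilim : lim' ≤ hi := le_max_left _ _
      have hiM : M ≤ hi := le_trans (le_max_left M _) (le_max_right lim' _)
      have hiH : (host.toList.length : Int) + 1 ≤ hi :=
        le_trans (le_max_right M _) (le_max_right lim' _)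
      have hok_hi : pvOkB seqs host hi = true := by
        rw [pvOkB_stab seqs host hi (by omega)
          (fun k hk => le_trans (hMmax k hk) hiM)
          hiH]
        exact hsb
      have hEx : ∃ n : Nat, pvOkB seqs host (lim' + (n : Int)) = true := by
        refine ⟨(hi - lim').toNat, ?_⟩
        have he : lim' + (((hi - lim').toNat : Nat) : Int) = hi := by omega
        rw [he]; exact hok_hi
      set L : Int := lim' + ((Nat.find hEx : Nat) : Int) with hL
      have hokL : pvOkB seqs host L = true := Nat.find_spec hEx
      have hlimL : lim' ≤ L := by omega
      have hLmin : ∀ r, lim' ≤ r → r < L → pvOkB seqs host r = false := by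
        intro r h1 h2
        have hlt : (r - lim').toNat < Nat.find hEx := by omega
        have hnot := Nat.find_min hEx hlt
        have hr : lim' + (((r - lim').toNat : Nat) : Int) = r := by omega
        rw [hr] at hnot
        simpa using hnot
      have hLhi : L ≤ hi := by
        have : Nat.find hEx ≤ (hi - lim').toNat := Nat.find_min' hEx (by
          have he : lim' + (((hi - lim').toNat : Nat) : Int) = hi := by omega
          rw [he]; exact hok_hi)
        omega
      have hA : pvLoopA seqs host
          ((seqs.map (fun k => k.toList.length)).foldr max 0 + host.toList.length + 2) lim'
          = (L, "") := by
        set FN : Nat := (seqs.map (fun k => k.toList.length)).foldr max 0 with hFN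
        have hMfold : M ≤ ((FN : Nat) : Int) := by
          have hmem := PySem.List.max?_mem hM
          simp only [List.mem_map] at hmem
          obtain ⟨k, hk, hkM⟩ := hmem
          have : k.toList.length ≤ FN :=
            pvLeFoldrMax _ _ (by simp only [List.mem_map]; exact ⟨k, hk, rfl⟩)
          omega
        have hhile : hi ≤ lim' + ((FN : Nat) : Int) + host.toList.length + 1 := by
          rw [hhi]
          apply max_le (by omega) (max_le (by omega) (by omega))
        exact pvLoopA_spec seqs host L
          (by rw [pvCondA_eq seqs host L hne (by omega)]; exact hokL)
          _ lim' hlimL (by omega) (fun r h1 h2 => by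
            rw [pvCondA_eq seqs host r hne (by omega)]; exact hLmin r h1 h2)
      have hB : pvBsearch seqs host lim' hi = L :=
        pvBsearch_spec seqs host L lim' hi hlim1 hlimL hLhi hokL hLmin
      rw [if_pos trivial, if_pos trivial, hA, hB]
  · by_cases hH : host.toList ≠ [] ∧
        (pvSuffixes seqs x).any (fun k => PySem.Chars.isIn k (pvWrap host x)) = true
    · simp only [shortest_probe, shortest_probe_alt, hx, pvFilterLen]
      first
        | (rw [if_pos hdup, if_pos hdup])
        | (rw [if_neg hdup, if_neg hdup])
      first
        | (rw [if_pos hH, if_pos hH])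
        | (rw [if_neg hH, if_neg hH])
      rw [if_neg (by simp), if_neg (by simp)]
      simp [PySem.Chars.join, List.intercalate]
    · simp only [shortest_probe, shortest_probe_alt, hx, pvFilterLen]
      first
        | (rw [if_pos hdup, if_pos hdup])
        | (rw [if_neg hdup, if_neg hdup])
      first
        | (rw [if_pos hH, if_pos hH])
        | (rw [if_neg hH, if_neg hH])
      rw [if_neg (by simp), if_neg (by simp)]
      simp [PySem.Chars.join, List.intercalate]
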